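-- pv_equiv track=rewrite | github.com/NewtonSheep/gjf_editor | src/gjf_editor/parser.py | parse_keyword_with_params
-- ===== SOURCE A (Python) =====
-- from typing import Dict, List, Optional, Tuple
--
-- def parse_keyword_with_params(
--     keyword_string: str
-- ) -> Tuple[str, Dict[str, str]]:
--     """
--     Parseia uma string de keyword com parâmetros de forma mais robusta
--
--     Args:
--         keyword_string: String da keyword (ex: "scrf=(smd,solvent=water)")
--
--     Returns:
--         Tuple (nome_da_keyword, parâmetros)
--     """
--     if "=" not in keyword_string:
--         return keyword_string, {}
--
--     # Separa nome e parâmetros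
--     if "(" in keyword_string and ")" in keyword_string:
--         # Formato: keyword=(param1=value1,param2=value2)
--         name_end = keyword_string.find("=")
--         name = keyword_string[:name_end]
--
--         params_start = keyword_string.find("(") + 1
--         params_end = keyword_string.find(")")
--         params_str = keyword_string[params_start:params_end]
--
--         params = {}
--         # Processa parâmetros separados por vírgula
--         param_parts = []
--         current_part = ""
--         in_quotes = False
--         paren_depth = 0
--
--         for char in params_str:
--             if char == '"' or char == "'":
--                 in_quotes = not in_quotes
--                 current_part += char
--             elif char == "(":
--                 paren_depth += 1
--                 current_part += char
--             elif char == ")":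
--                 paren_depth -= 1
--                 current_part += char
--             elif char == "," and not in_quotes and paren_depth == 0:
--                 param_parts.append(current_part.strip())
--                 current_part = ""
--             else:
--                 current_part += char
--
--         if current_part:
--             param_parts.append(current_part.strip())
--
--         # Processa cada parte do parâmetro
--         for part in param_parts:
--             if "=" in part:
--                 key, value = part.split("=", 1)
--                 params[key.strip()] = value.strip()
--             else:
--                 # Parâmetro sem valor (ex: "smd" em "scrf=(smd,solvent=water)")
--                 params[part] = ""
--
--         return name, params
--     else:
--         # Formato simples: keyword=value
--         name, value = keyword_string.split("=", 1)
--         return name, {"value": value}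
-- ===== SOURCE B (Python) =====
-- def parse_keyword_with_params(keyword_string):
--     """Parse "name=(p1=v1,p2,...)" / "name=value" / bare keyword into (name, params dict).
--
--     Single pass over the parenthesised parameter text keeping a key buffer, a
--     value buffer and a seen-equals flag, inserting each parameter as soon as its
--     top-level comma (or the end) is reached — no intermediate part list.
--     """
--     if "=" not in keyword_string:
--         return keyword_string, {}
--     if "(" not in keyword_string or ")" not in keyword_string:
--         name, value = keyword_string.split("=", 1)
--         return name, {"value": value}
--
--     name = keyword_string[:keyword_string.find("=")]
--     params_str = keyword_string[keyword_string.find("(") + 1:keyword_string.find(")")]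
--
--     params = {}
--     key, value, seen_eq = "", "", False
--     in_quotes = False
--     depth = 0
--     for ch in params_str:
--         if ch == "," and not in_quotes and depth == 0:
--             params[key.strip()] = value.strip() if seen_eq else ""
--             key, value, seen_eq = "", "", False
--             continue
--         if ch in "\"'":
--             in_quotes = not in_quotes
--         elif ch == "(":
--             depth += 1
--         elif ch == ")":
--             depth -= 1
--         elif ch == "=" and not seen_eq:
--             seen_eq = True
--             continue
--         if seen_eq:
--             value += ch
--         else:
--             key += ch
--     if key or value or seen_eq:
--         params[key.strip()] = value.strip() if seen_eq else ""
--     return name, params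
-- ===== Notes on version B (the rewrite author's own statement) =====
-- stated objective: simpler
-- what changed: The paren-parameter case's two-phase scan (char loop building a list of stripped parts, then a second loop splitting each part at its first equals sign) is replaced by one char pass over key/value buffers with a seen-equals flag that inserts each parameter into the dict directly at its top-level comma, eliminating the intermediate part list and the per-part split.
import Mathlib
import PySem

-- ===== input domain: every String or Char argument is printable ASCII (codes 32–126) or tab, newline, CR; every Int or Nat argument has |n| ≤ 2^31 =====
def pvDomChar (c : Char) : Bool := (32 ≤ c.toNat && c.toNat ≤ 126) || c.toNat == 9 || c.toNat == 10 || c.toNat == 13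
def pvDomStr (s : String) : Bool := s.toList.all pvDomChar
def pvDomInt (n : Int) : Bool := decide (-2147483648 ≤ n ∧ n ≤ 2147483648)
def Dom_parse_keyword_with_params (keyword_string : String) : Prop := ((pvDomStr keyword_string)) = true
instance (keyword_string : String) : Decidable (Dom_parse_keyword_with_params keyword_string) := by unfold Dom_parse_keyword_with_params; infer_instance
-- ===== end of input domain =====

-- B re-decomposes A's paren-parameter parsing (part list built by one char loop, then a second parse loop)
-- into a single char pass over key/value buffers that inserts each parameter at its top-level comma; objective: simpler.

-- ===== PORT A =====
-- A's char loop: state (param_parts, current_part, in_quotes, paren_depth)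
def pkA_step (st : List (List Char) × List Char × Bool × Int) (c : Char) :
    List (List Char) × List Char × Bool × Int :=
  let (parts, cur, inq, pd) := st
  if c = '"' ∨ c = '\'' then (parts, cur ++ [c], !inq, pd)
  else if c = '(' then (parts, cur ++ [c], inq, pd + 1)
  else if c = ')' then (parts, cur ++ [c], inq, pd - 1)
  else if c = ',' ∧ inq = false ∧ pd = 0 then (parts ++ [PySem.Chars.strip cur], [], inq, pd)
  else (parts, cur ++ [c], inq, pd)

-- A's second loop body: parse one part (part.split("=", 1) always has exactly 2 pieces when "=" in part,
-- so the catch-all arm of the match is unreachable)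
def pkA_proc (d : PySem.Dict String String) (part : List Char) : PySem.Dict String String :=
  if PySem.Chars.isIn ['='] part then
    match PySem.Chars.splitMax? part ['='] 1 with
    | some (k :: v :: _) =>
        d.insert (String.mk (PySem.Chars.strip k)) (String.mk (PySem.Chars.strip v))
    | _ => d
  else d.insert (String.mk part) ""

def parse_keyword_with_params (keyword_string : String) : String × (List (String × String)) :=
  if PySem.Str.isIn "=" keyword_string = false then (keyword_string, [])
  else if PySem.Str.isIn "(" keyword_string && PySem.Str.isIn ")" keyword_string then
    let name_end := PySem.Str.find keyword_string "="
    let name := PySem.Str.slice keyword_string none (some name_end)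
    let params_start := PySem.Str.find keyword_string "(" + 1
    let params_end := PySem.Str.find keyword_string ")"
    let params_str := PySem.Str.slice keyword_string (some params_start) (some params_end)
    let st := params_str.toList.foldl pkA_step ([], [], false, 0)
    let param_parts := if st.2.1 ≠ [] then st.1 ++ [PySem.Chars.strip st.2.1] else st.1
    let params := param_parts.foldl pkA_proc PySem.Dict.empty
    (name, params.items)
  else
    -- keyword_string.split("=", 1): "=" is present, so exactly 2 pieces; catch-all unreachable
    match PySem.Str.splitMax? keyword_string "=" 1 with
    | some (name :: value :: _) => (name, [("value", value)])
    | _ => (keyword_string, [])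

-- ===== PORT B =====
-- B's single pass: state (params, key, value, seen_eq, in_quotes, depth)
def pkB_step (st : PySem.Dict String String × List Char × List Char × Bool × Bool × Int) (c : Char) :
    PySem.Dict String String × List Char × List Char × Bool × Bool × Int :=
  let (params, key, value, seeneq, inq, depth) := st
  if c = ',' ∧ inq = false ∧ depth = 0 then
    (params.insert (String.mk (PySem.Chars.strip key))
       (if seeneq then String.mk (PySem.Chars.strip value) else ""),
     [], [], false, inq, depth)
  else
    -- the elif chain; set_eq marks the '=' arm's `continue`
    let (inq', depth', set_eq) :=
      if c = '"' ∨ c = '\'' then (!inq, depth, false)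
      else if c = '(' then (inq, depth + 1, false)
      else if c = ')' then (inq, depth - 1, false)
      else if c = '=' ∧ seeneq = false then (inq, depth, true)
      else (inq, depth, false)
    if set_eq then (params, key, value, true, inq', depth')
    else if seeneq then (params, key, value ++ [c], seeneq, inq', depth')
    else (params, key ++ [c], value, seeneq, inq', depth')

-- flush of the last buffered parameter (`if key or value or seen_eq`)
def pkB_fin (st : PySem.Dict String String × List Char × List Char × Bool × Bool × Int) :
    PySem.Dict String String :=
  let (params, key, value, seeneq, _, _) := st
  if key ≠ [] ∨ value ≠ [] ∨ seeneq then
    params.insert (String.mk (PySem.Chars.strip key))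
      (if seeneq then String.mk (PySem.Chars.strip value) else "")
  else params

def parse_keyword_with_params_alt (keyword_string : String) : String × (List (String × String)) :=
  if PySem.Str.isIn "=" keyword_string = false then (keyword_string, [])
  else if !(PySem.Str.isIn "(" keyword_string) || !(PySem.Str.isIn ")" keyword_string) then
    match PySem.Str.splitMax? keyword_string "=" 1 with
    | some (name :: value :: _) => (name, [("value", value)])
    | _ => (keyword_string, [])
  else
    let name := PySem.Str.slice keyword_string none (some (PySem.Str.find keyword_string "="))
    let params_str := PySem.Str.slice keyword_string
      (some (PySem.Str.find keyword_string "(" + 1)) (some (PySem.Str.find keyword_string ")"))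
    let st := params_str.toList.foldl pkB_step (PySem.Dict.empty, [], [], false, false, 0)
    (name, (pkB_fin st).items)

-- ===== PRECONDITION & SPEC =====
def Spec_parse_keyword_with_params (keyword_string : String) (out : String × (List (String × String))) : Prop := out = parse_keyword_with_params_alt keyword_string
instance (keyword_string : String) (out : String × (List (String × String))) : Decidable (Spec_parse_keyword_with_params keyword_string out) := by unfold Spec_parse_keyword_with_params; infer_instance

-- ===== CLAIM (what is proved, stated in full; the proofs are below) =====
def Claim_equal_parse_keyword_with_params : Prop := ∀ (keyword_string : String), Dom_parse_keyword_with_params keyword_string → Spec_parse_keyword_with_params keyword_string (parse_keyword_with_params keyword_string)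


-- ===== LEMMAS AND PROOFS =====

theorem lstrip_cons (c : Char) (t : List Char) :
    PySem.Chars.lstrip (c :: t) = if PySem.Chars.isspace c then PySem.Chars.lstrip t else c :: t := by
  simp [PySem.Chars.lstrip, List.dropWhile_cons]

theorem rstrip_cons (c : Char) (t : List Char) :
    PySem.Chars.rstrip (c :: t) =
      if PySem.Chars.rstrip t = [] then (if PySem.Chars.isspace c then [] else [c])
      else c :: PySem.Chars.rstrip t := by
  simp only [PySem.Chars.rstrip]
  rw [show (c :: t).reverse = t.reverse ++ [c] from by simp, List.dropWhile_append]
  by_cases h : List.dropWhile PySem.Chars.isspace t.reverse = []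
  · simp [h, List.dropWhile_cons]
    split <;> simp
  · simp [h, List.isEmpty_iff]

theorem lstrip_append_eq (a b : List Char) :
    PySem.Chars.lstrip (a ++ '=' :: b) = PySem.Chars.lstrip a ++ '=' :: b := by
  simp [PySem.Chars.lstrip, List.dropWhile_append]
  intro h
  have h0 : List.dropWhile PySem.Chars.isspace a = [] := List.dropWhile_eq_nil_iff.mpr h
  simp [h0, List.dropWhile_cons, show PySem.Chars.isspace '=' = false from by decide]

theorem rstrip_append_eq (a b : List Char) :
    PySem.Chars.rstrip (a ++ '=' :: b) = a ++ '=' :: PySem.Chars.rstrip b := by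
  simp [PySem.Chars.rstrip, List.reverse_append, List.dropWhile_append]
  intro h
  have h0 : List.dropWhile PySem.Chars.isspace b.reverse = [] :=
    List.dropWhile_eq_nil_iff.mpr (by simpa using h)
  simp [h0, List.dropWhile_cons, show PySem.Chars.isspace '=' = false from by decide]

theorem mem_lstrip {c : Char} {a : List Char} (h : c ∈ PySem.Chars.lstrip a) : c ∈ a := by
  simp only [PySem.Chars.lstrip] at h
  exact (List.dropWhile_sublist _).subset h

theorem mem_rstrip {c : Char} {a : List Char} (h : c ∈ PySem.Chars.rstrip a) : c ∈ a := by
  simp only [PySem.Chars.rstrip, List.mem_reverse] at h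
  simpa using (List.dropWhile_sublist _).subset h

theorem mem_strip {c : Char} {a : List Char} (h : c ∈ PySem.Chars.strip a) : c ∈ a := by
  simp only [PySem.Chars.strip] at h
  exact mem_lstrip (mem_rstrip h)

theorem lstrip_rstrip_comm (a : List Char) :
    PySem.Chars.lstrip (PySem.Chars.rstrip a) = PySem.Chars.rstrip (PySem.Chars.lstrip a) := by
  induction a with
  | nil => rfl
  | cons c t ih =>
    rw [rstrip_cons, lstrip_cons]
    by_cases hp : PySem.Chars.isspace c
    · simp only [hp, if_true]
      by_cases hz : PySem.Chars.rstrip t = []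
      · simp only [hz, if_pos trivial]
        rw [show PySem.Chars.lstrip [] = [] from rfl, ← ih, hz]
        rfl
      · simp [hz, lstrip_cons, hp, ih]
    · simp only [hp, if_false]
      by_cases hz : PySem.Chars.rstrip t = []
      · simp [hz, lstrip_cons, hp, rstrip_cons]
      · simp [hz, lstrip_cons, hp, rstrip_cons, ih]

theorem lstrip_idem (a : List Char) :
    PySem.Chars.lstrip (PySem.Chars.lstrip a) = PySem.Chars.lstrip a := by
  simp [PySem.Chars.lstrip, List.dropWhile_idempotent]

theorem rstrip_idem (a : List Char) :
    PySem.Chars.rstrip (PySem.Chars.rstrip a) = PySem.Chars.rstrip a := by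
  simp [PySem.Chars.rstrip, List.dropWhile_idempotent]

theorem strip_lstrip (a : List Char) :
    PySem.Chars.strip (PySem.Chars.lstrip a) = PySem.Chars.strip a := by
  simp [PySem.Chars.strip, lstrip_idem]

theorem strip_rstrip (a : List Char) :
    PySem.Chars.strip (PySem.Chars.rstrip a) = PySem.Chars.strip a := by
  simp only [PySem.Chars.strip, lstrip_rstrip_comm, rstrip_idem]

-- split("=", 1): the fuelled splitter once maxsplit is exhausted
theorem go_m0 (b cur : List Char) (fuel : Nat) (acc : List (List Char)) :
    PySem.Chars.splitOnMax.go ['='] fuel 0 b cur acc = ((cur.reverse ++ b) :: acc).reverse := by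
  cases fuel with
  | zero => simp [PySem.Chars.splitOnMax.go]
  | succ f => cases b with
    | nil => simp [PySem.Chars.splitOnMax.go]
    | cons c r => simp [PySem.Chars.splitOnMax.go]

-- split("=", 1): the fuelled splitter up to the first '='
theorem go_m1 : ∀ (a : List Char) (fuel : Nat) (cur : List Char) (acc : List (List Char))
    (b : List Char), '=' ∉ a → a.length + 2 ≤ fuel →
    PySem.Chars.splitOnMax.go ['='] fuel 1 (a ++ '=' :: b) cur acc
      = (b :: (a.reverse ++ cur).reverse :: acc).reverse := by
  intro a
  induction a with
  | nil =>
    intro fuel cur acc b _ hf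
    obtain ⟨f, rfl⟩ : ∃ f, fuel = f + 1 := ⟨fuel - 1, by omega⟩
    simp [PySem.Chars.splitOnMax.go, List.isPrefixOf, go_m0]
  | cons c a' ih =>
    intro fuel cur acc b ha hf
    obtain ⟨f, rfl⟩ : ∃ f, fuel = f + 1 := ⟨fuel - 1, by omega⟩
    have hc : c ≠ '=' := fun h => ha (h ▸ List.mem_cons_self ..)
    have hpre : List.isPrefixOf ['='] ((c :: a') ++ '=' :: b) = false := by
      simp [List.isPrefixOf]; exact fun h => absurd h.symm hc
    rw [List.cons_append]
    simp only [PySem.Chars.splitOnMax.go, hpre]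
    norm_num
    rw [ih f (c :: cur) acc b (fun h => ha (List.mem_cons_of_mem _ h)) (by simp at hf ⊢; omega)]
    rw [if_neg (fun h : '=' = c => hc h.symm)]
    simp

theorem splitMax_first_eq (a b : List Char) (ha : '=' ∉ a) :
    PySem.Chars.splitMax? (a ++ '=' :: b) ['='] 1 = some [a, b] := by
  simp only [PySem.Chars.splitMax?, PySem.Chars.splitOnMax]
  norm_num
  rw [go_m1 a (a.length + (b.length + 1) + 1) [] [] b ha (by omega)]
  simp

theorem isIn_eq_of_mem (part : List Char) (h : '=' ∈ part) :
    PySem.Chars.isIn ['='] part = true := by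
  rw [PySem.Chars.isIn_iff_infix]
  obtain ⟨s, t, rfl⟩ := List.append_of_mem h
  exact ⟨s, t, by simp⟩

theorem isIn_eq_of_not_mem (part : List Char) (h : '=' ∉ part) :
    PySem.Chars.isIn ['='] part = false := by
  rw [PySem.Chars.isIn_eq_false_iff]
  intro hinf
  exact h (hinf.subset (List.mem_singleton_self _))

-- A's per-part parse of a stripped buffer equals B's direct insertion
theorem proc_strip_eq (d : PySem.Dict String String) (key value : List Char) (seeneq : Bool)
    (hk : '=' ∉ key) :
    pkA_proc d (PySem.Chars.strip (key ++ (if seeneq then '=' :: value else [])))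
      = d.insert (String.mk (PySem.Chars.strip key))
          (if seeneq then String.mk (PySem.Chars.strip value) else "") := by
  cases seeneq with
  | false =>
    simp only [Bool.false_eq_true, if_false, List.append_nil]
    have h1 : '=' ∉ PySem.Chars.strip key := fun h => hk (mem_strip h)
    unfold pkA_proc
    rw [isIn_eq_of_not_mem _ h1]
    simp
  | true =>
    simp only [if_true]
    have hstrip : PySem.Chars.strip (key ++ '=' :: value)
        = PySem.Chars.lstrip key ++ '=' :: PySem.Chars.rstrip value := by
      simp only [PySem.Chars.strip, lstrip_append_eq, rstrip_append_eq]
    rw [hstrip]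
    unfold pkA_proc
    rw [isIn_eq_of_mem _ (by simp), splitMax_first_eq _ _ (fun h => hk (mem_lstrip h))]
    simp only [if_true]
    rw [show PySem.Chars.strip (PySem.Chars.lstrip key) = PySem.Chars.strip key from strip_lstrip key,
        show PySem.Chars.strip (PySem.Chars.rstrip value) = PySem.Chars.strip value from strip_rstrip value]

-- the parts accumulator of A's char loop only ever grows at the back
theorem pkA_foldl_factor (cs : List Char) (parts : List (List Char)) (cur : List Char)
    (inq : Bool) (pd : Int) :
    cs.foldl pkA_step (parts, cur, inq, pd)
      = (parts ++ (cs.foldl pkA_step ([], cur, inq, pd)).1,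
         (cs.foldl pkA_step ([], cur, inq, pd)).2) := by
  induction cs generalizing parts cur inq pd with
  | nil => simp
  | cons c cs ih =>
    have hstep : ∀ P : List (List Char), pkA_step (P, cur, inq, pd) c
        = (P ++ (pkA_step ([], cur, inq, pd) c).1, (pkA_step ([], cur, inq, pd) c).2) := by
      intro P
      simp only [pkA_step]
      split_ifs <;> simp
    rcases hq1 : pkA_step ([], cur, inq, pd) c with ⟨q1, c2, i2, p2⟩
    rw [List.foldl_cons, List.foldl_cons, hstep parts, hq1]
    rw [ih (parts ++ q1) c2 i2 p2, ih q1 c2 i2 p2]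
    simp

-- peeling the first finished part off A's second loop
theorem finalize_cons (d : PySem.Dict String String) (x : List Char)
    (P : List (List Char)) (c2 : List Char) :
    ((if c2 ≠ [] then (x :: P) ++ [PySem.Chars.strip c2] else x :: P).foldl pkA_proc d)
      = ((if c2 ≠ [] then P ++ [PySem.Chars.strip c2] else P).foldl pkA_proc (pkA_proc d x)) := by
  split <;> simp [List.foldl_cons]

theorem pkB_fin_eq (d : PySem.Dict String String) (key value : List Char) (seeneq inq : Bool)
    (pd : Int) :
    pkB_fin (d, key, value, seeneq, inq, pd)
      = if key ≠ [] ∨ value ≠ [] ∨ seeneq = true then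
          d.insert (String.mk (PySem.Chars.strip key))
            (if seeneq = true then String.mk (PySem.Chars.strip value) else "")
        else d := rfl

-- the central loop correspondence
theorem loop_eq (cs : List Char) (d : PySem.Dict String String) (cur key value : List Char)
    (seeneq inq : Bool) (pd : Int) (hk : '=' ∉ key) (hv : seeneq = false → value = [])
    (hcur : cur = key ++ (if seeneq then '=' :: value else [])) :
    (let st := cs.foldl pkA_step ([], cur, inq, pd)
     (if st.2.1 ≠ [] then st.1 ++ [PySem.Chars.strip st.2.1] else st.1).foldl pkA_proc d)
      = pkB_fin (cs.foldl pkB_step (d, key, value, seeneq, inq, pd)) := by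
  induction cs generalizing d cur key value seeneq inq pd with
  | nil =>
    dsimp only [List.foldl_nil]
    cases seeneq with
    | false =>
      obtain rfl := hv rfl
      simp only [Bool.false_eq_true, if_false, List.append_nil] at hcur
      subst cur
      by_cases hk0 : key = []
      · subst hk0
        rw [if_neg (by simp), pkB_fin_eq, if_neg (by simp)]
        rfl
      · rw [if_pos hk0]
        have hp := proc_strip_eq d key [] false hk
        simp only [Bool.false_eq_true, if_false, List.append_nil] at hp
        simp only [List.nil_append, List.foldl_cons, List.foldl_nil, hp]
        rw [pkB_fin_eq, if_pos (Or.inl hk0)]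
        simp
    | true =>
      simp only [if_true] at hcur
      subst cur
      rw [if_pos (by simp)]
      have hp := proc_strip_eq d key value true hk
      simp only [if_true] at hp
      simp only [List.nil_append, List.foldl_cons, List.foldl_nil, hp]
      rw [pkB_fin_eq, if_pos (Or.inr (Or.inr rfl))]
      simp
  | cons c cs ih =>
    simp only [List.foldl_cons]
    by_cases hq : c = '"' ∨ c = '\''
    · have hcq : c ≠ ',' := by rcases hq with rfl | rfl <;> decide
      have hce : c ≠ '=' := by rcases hq with rfl | rfl <;> decide
      have hcm : ¬(c = ',' ∧ inq = false ∧ pd = 0) := fun h => hcq h.1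
      have hA : pkA_step ([], cur, inq, pd) c = ([], cur ++ [c], !inq, pd) := by
        simp only [pkA_step]
        rw [if_pos hq]
      have hB : pkB_step (d, key, value, seeneq, inq, pd) c
          = (if seeneq then (d, key, value ++ [c], seeneq, !inq, pd)
             else (d, key ++ [c], value, seeneq, !inq, pd)) := by
        simp only [pkB_step]
        rw [if_neg hcm, if_pos hq]
        cases seeneq <;> simp
      rw [hA, hB]
      cases seeneq with
      | true =>
        simp only [if_true]
        exact ih d (cur ++ [c]) key (value ++ [c]) true (!inq) pd hk (by simp)
          (by simp [hcur])
      | false =>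
        obtain rfl := hv rfl
        simp only [Bool.false_eq_true, if_false]
        exact ih d (cur ++ [c]) (key ++ [c]) [] false (!inq) pd
          (by simp [hk]; exact fun h => hce h.symm) (fun _ => rfl)
          (by simp [hcur])
    · by_cases hpo : c = '('
      · subst hpo
        have hA : pkA_step ([], cur, inq, pd) '(' = ([], cur ++ ['('], inq, pd + 1) := by
          simp [pkA_step]
        have hB : pkB_step (d, key, value, seeneq, inq, pd) '('
            = (if seeneq then (d, key, value ++ ['('], seeneq, inq, pd + 1)
               else (d, key ++ ['('], value, seeneq, inq, pd + 1)) := by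
          simp only [pkB_step]
          cases seeneq <;> simp
        rw [hA, hB]
        cases seeneq with
        | true =>
          simp only [if_true]
          exact ih d (cur ++ ['(']) key (value ++ ['(']) true inq (pd + 1) hk (by simp)
            (by simp [hcur])
        | false =>
          obtain rfl := hv rfl
          simp only [Bool.false_eq_true, if_false]
          exact ih d (cur ++ ['(']) (key ++ ['(']) [] false inq (pd + 1)
            (by simp [hk]) (fun _ => rfl) (by simp [hcur])
      · by_cases hpc : c = ')'
        · subst hpc
          have hA : pkA_step ([], cur, inq, pd) ')' = ([], cur ++ [')'], inq, pd - 1) := by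
            simp [pkA_step]
          have hB : pkB_step (d, key, value, seeneq, inq, pd) ')'
              = (if seeneq then (d, key, value ++ [')'], seeneq, inq, pd - 1)
                 else (d, key ++ [')'], value, seeneq, inq, pd - 1)) := by
            simp only [pkB_step]
            cases seeneq <;> simp
          rw [hA, hB]
          cases seeneq with
          | true =>
            simp only [if_true]
            exact ih d (cur ++ [')']) key (value ++ [')']) true inq (pd - 1) hk (by simp)
              (by simp [hcur])
          | false =>
            obtain rfl := hv rfl
            simp only [Bool.false_eq_true, if_false]
            exact ih d (cur ++ [')']) (key ++ [')']) [] false inq (pd - 1)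
              (by simp [hk]) (fun _ => rfl) (by simp [hcur])
        · by_cases hcm : c = ',' ∧ inq = false ∧ pd = 0
          · obtain ⟨rfl, rfl, rfl⟩ := hcm
            have hA : pkA_step ([], cur, false, 0) ','
                = ([PySem.Chars.strip cur], [], false, 0) := by
              simp [pkA_step]
            have hB : pkB_step (d, key, value, seeneq, false, 0) ','
                = (d.insert (String.mk (PySem.Chars.strip key))
                     (if seeneq then String.mk (PySem.Chars.strip value) else ""),
                   [], [], false, false, 0) := by
              simp [pkB_step]
            rw [hA, hB]
            rw [pkA_foldl_factor cs [PySem.Chars.strip cur] [] false 0]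
            dsimp only
            rw [List.singleton_append, finalize_cons, hcur,
                proc_strip_eq d key value seeneq hk]
            exact ih (d.insert (String.mk (PySem.Chars.strip key))
                (if seeneq then String.mk (PySem.Chars.strip value) else ""))
              [] [] [] false false 0 (by simp) (fun _ => rfl) (by simp)
          · by_cases heq : c = '='
            · subst heq
              have hA : pkA_step ([], cur, inq, pd) '=' = ([], cur ++ ['='], inq, pd) := by
                simp only [pkA_step]
                rw [if_neg hq, if_neg (by decide), if_neg (by decide), if_neg hcm]
              cases seeneq with
              | true =>
                have hB : pkB_step (d, key, value, true, inq, pd) '='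
                    = (d, key, value ++ ['='], true, inq, pd) := by
                  simp only [pkB_step]
                  rw [if_neg hcm]
                  simp
                rw [hA, hB]
                exact ih d (cur ++ ['=']) key (value ++ ['=']) true inq pd hk (by simp)
                  (by simp [hcur])
              | false =>
                obtain rfl := hv rfl
                have hB : pkB_step (d, key, [], false, inq, pd) '='
                    = (d, key, [], true, inq, pd) := by
                  simp only [pkB_step]
                  rw [if_neg hcm]
                  simp
                rw [hA, hB]
                exact ih d (cur ++ ['=']) key [] true inq pd hk (by simp)
                  (by simp [hcur])
            · have hA : pkA_step ([], cur, inq, pd) c = ([], cur ++ [c], inq, pd) := by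
                simp only [pkA_step]
                rw [if_neg hq, if_neg hpo, if_neg hpc, if_neg hcm]
              have hB : pkB_step (d, key, value, seeneq, inq, pd) c
                  = (if seeneq then (d, key, value ++ [c], seeneq, inq, pd)
                     else (d, key ++ [c], value, seeneq, inq, pd)) := by
                simp only [pkB_step]
                rw [if_neg hcm, if_neg hq, if_neg hpo, if_neg hpc]
                cases seeneq <;> simp [heq]
              rw [hA, hB]
              cases seeneq with
              | true =>
                simp only [if_true]
                exact ih d (cur ++ [c]) key (value ++ [c]) true inq pd hk (by simp)
                  (by simp [hcur])
              | false =>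
                obtain rfl := hv rfl
                simp only [Bool.false_eq_true, if_false]
                exact ih d (cur ++ [c]) (key ++ [c]) [] false inq pd
                  (by simp [hk]; exact fun h => heq h.symm) (fun _ => rfl)
                  (by simp [hcur])

-- ===== VERDICT (by name: the statement is the Claim_ definition above) =====
theorem parse_keyword_with_params_spec : Claim_equal_parse_keyword_with_params := by
  intro s _
  unfold Spec_parse_keyword_with_params parse_keyword_with_params parse_keyword_with_params_alt
  by_cases h1 : PySem.Str.isIn "=" s = false
  · rw [if_pos h1, if_pos h1]
  · rw [if_neg h1, if_neg h1]
    by_cases h2 : (PySem.Str.isIn "(" s && PySem.Str.isIn ")" s) = true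
    · have h2' := h2
      rw [Bool.and_eq_true] at h2'
      rw [if_pos h2, if_neg (by rw [h2'.1, h2'.2]; simp)]
      dsimp only
      have := loop_eq (PySem.Str.slice s (some (PySem.Str.find s "(" + 1))
          (some (PySem.Str.find s ")"))).toList PySem.Dict.empty [] [] [] false false 0
          (by simp) (fun _ => rfl) (by simp)
      dsimp only at this
      rw [this]
    · have h3 : (!(PySem.Str.isIn "(" s) || !(PySem.Str.isIn ")" s)) = true := by
        cases h4 : PySem.Str.isIn "(" s with
        | false => rfl
        | true => cases h5 : PySem.Str.isIn ")" s with
          | false => rfl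
          | true => exact absurd (by rw [h4, h5]; rfl) h2
      rw [if_neg h2, if_pos h3]
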